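-- pv_equiv track=rewrite | github.com/wardahmad/Quantum_Computing_Final_Project | Quantum_steganography/Confusing.py | Confusing
-- ===== SOURCE A (Python) =====
-- def Confusing(BSM):
--
--
--     random_steps=3
--     FBSM=[]
--     index_=[]
--     x=0
--
--     #create FBSM and Indexes
--     for i in range(len(BSM)):
--              FBSM.append(BSM[i])
--              index_.append('1')
--              x+=1
--              if x==2:
--                  FBSM.append('x')
--                  index_.append('0')
--                  x=0
--
--     #converting lists to strings
--     FBSM = ''.join(str(i) for i in FBSM )
--     index_ = ''.join(str(i) for i in index_ )
--
--     return FBSM,index_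
-- ===== SOURCE B (Python) =====
-- def Confusing(BSM):
--     fparts = []
--     iparts = []
--     for i in range(0, len(BSM), 2):
--         chunk = BSM[i:i+2]
--         if len(chunk) == 2:
--             fparts += [str(chunk[0]), str(chunk[1]), 'x']
--             iparts += ['1', '1', '0']
--         else:
--             fparts.append(str(chunk[0]))
--             iparts.append('1')
--     return ''.join(fparts), ''.join(iparts)
-- ===== Notes on version B (the rewrite author's own statement) =====
-- stated objective: simpler
-- what changed: Replaces A's per-element loop with a mod-2 counter and mutable flag by a pairwise chunking pass (step-2 loop over slices) that emits each pair plus its 'x'/'0' marker at once, then joins.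
import Mathlib
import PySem

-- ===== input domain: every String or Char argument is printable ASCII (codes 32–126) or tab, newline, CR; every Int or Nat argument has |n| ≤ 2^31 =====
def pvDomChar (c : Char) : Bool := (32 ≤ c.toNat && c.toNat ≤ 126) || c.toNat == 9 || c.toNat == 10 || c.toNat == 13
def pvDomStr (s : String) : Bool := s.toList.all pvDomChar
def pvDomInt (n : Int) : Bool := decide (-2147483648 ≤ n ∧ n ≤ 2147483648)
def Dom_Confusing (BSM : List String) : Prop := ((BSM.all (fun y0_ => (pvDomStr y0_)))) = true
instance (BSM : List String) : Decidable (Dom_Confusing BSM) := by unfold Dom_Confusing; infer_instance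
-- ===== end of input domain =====

-- ===== PORT A =====
-- A's loop: append element and '1', bump counter x; when x hits 2 append 'x'/'0' and reset.
def confLoopA (l : List String) (st : List String × List String × Nat) : List String × List String × Nat :=
  l.foldl (fun st s =>
    let F := st.1 ++ [s]
    let I := st.2.1 ++ ["1"]
    let x := st.2.2 + 1
    if x = 2 then (F ++ ["x"], I ++ ["0"], 0) else (F, I, x)) st

def Confusing (BSM : List String) : String × String :=
  let st := confLoopA BSM ([], [], 0)
  (PySem.Str.join "" st.1, PySem.Str.join "" st.2.1)

-- ===== PORT B =====
-- B: chunking recursion, two elements at a time (port of the step-2 slice loop).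
def confChunks (l : List String) : List String × List String :=
  match l with
  | [] => ([], [])
  | [a] => ([a], ["1"])
  | a :: b :: rest =>
    let p := confChunks rest
    (a :: b :: "x" :: p.1, "1" :: "1" :: "0" :: p.2)

def Confusing_alt (BSM : List String) : String × String :=
  let p := confChunks BSM
  (PySem.Str.join "" p.1, PySem.Str.join "" p.2)

-- ===== PRECONDITION & SPEC =====
def Spec_Confusing (BSM : List String) (out : String × String) : Prop := out = Confusing_alt BSM
instance (BSM : List String) (out : String × String) : Decidable (Spec_Confusing BSM out) := by unfold Spec_Confusing; infer_instance

-- ===== CLAIM (what is proved, stated in full; the proofs are below) =====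
def Claim_equal_Confusing : Prop := ∀ (BSM : List String), Dom_Confusing BSM → Spec_Confusing BSM (Confusing BSM)

-- ===== LEMMAS AND PROOFS =====

theorem confLoopA_eq_chunks (l : List String) (F I : List String) :
    confLoopA l (F, I, 0) =
      (F ++ (confChunks l).1, I ++ (confChunks l).2, l.length % 2) := by
  induction l using confChunks.induct generalizing F I with
  | case1 => simp [confLoopA, confChunks]
  | case2 a => simp [confLoopA, confChunks]
  | case3 a b rest ih =>
    simp only [confLoopA, List.foldl_cons, confChunks] at *
    simp only [List.length_cons]
    rw [show (rest.length + 1 + 1) % 2 = rest.length % 2 by omega]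
    have := ih (F ++ [a] ++ [b] ++ ["x"]) (I ++ ["1"] ++ ["1"] ++ ["0"])
    simpa using this

-- ===== VERDICT (by name: the statement is the Claim_ definition above) =====
theorem Confusing_spec : Claim_equal_Confusing := by
  intro BSM _
  show Confusing BSM = Confusing_alt BSM
  simp [Confusing, Confusing_alt, confLoopA_eq_chunks]
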